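-- pv_equiv track=rewrite | github.com/Fector101/Laner | workers/helper.py | sortedDir
-- ===== SOURCE A (Python) =====
-- def sortedDir(dir_info:list):
--     """Sorts objects Alphabetically and Pushes files with dot to the back.
--
--     Args:
--         dir_info (list): a list of objects with a key 'text'
--
--     Returns:
--         list: returns a list sort objects according to 'text' attr
--     """
--     dir_info=sorted(dir_info,key=lambda path: path['text'])
--
--     # Push files with dot at front to the back
--     items_with_dot=[]
--     items_without_dot=[]
--     for each in dir_info:
--         if each['text'][0] == '.':
--             items_with_dot.append(each)
--         else:
--             items_without_dot.append(each)
--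
--     return [*items_without_dot, *items_with_dot]
-- ===== SOURCE B (Python) =====
-- def sortedDir(dir_info: list):
--     """Sorts objects alphabetically by 'text', pushing dot-prefixed entries to the back,
--     with a single stable sort on a composite key."""
--     return sorted(dir_info, key=lambda path: (path['text'][0] == '.', path['text']))
-- ===== Notes on version B (the rewrite author's own statement) =====
-- stated objective: simpler
-- what changed: Replaced A's sort-then-partition (stable sort by text, then a loop splitting entries into two bucket lists concatenated back) with a single sorted() call on the composite key (text[0]=='.', text).
import Mathlib
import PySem

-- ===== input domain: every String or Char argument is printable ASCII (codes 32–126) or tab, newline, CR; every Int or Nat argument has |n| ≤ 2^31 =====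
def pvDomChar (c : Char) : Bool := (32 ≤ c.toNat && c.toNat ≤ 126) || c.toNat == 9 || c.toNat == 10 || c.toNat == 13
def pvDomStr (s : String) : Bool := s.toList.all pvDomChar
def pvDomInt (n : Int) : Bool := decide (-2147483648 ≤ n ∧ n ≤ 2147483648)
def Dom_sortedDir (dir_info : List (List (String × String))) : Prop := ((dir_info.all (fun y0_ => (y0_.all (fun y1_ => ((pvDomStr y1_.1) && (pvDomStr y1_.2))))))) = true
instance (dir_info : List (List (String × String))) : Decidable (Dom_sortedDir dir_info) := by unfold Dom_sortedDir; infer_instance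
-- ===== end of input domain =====

-- B replaces A's sort-then-partition with one stable sort on the composite key (dot-flag, text); objective: simpler.


-- ===== PORT A =====
-- path['text']: first-match lookup; total via a default — Pre_ guarantees the key is present
def pvText (p : List (String × String)) : String := ((PySem.Dict.mk p).get? "text").getD ""
-- each['text'][0] == '.': total via a default — Pre_ guarantees the text is nonempty
def pvDot (p : List (String × String)) : Bool := ((PySem.Str.pyGet? (pvText p) 0).getD ' ') == '.'

def sortedDir (dir_info : List (List (String × String))) : List (List (String × String)) :=
  let di := PySem.List.sorted dir_info (fun path => pvText path) false
  let buckets := di.foldl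
    (fun (acc : List (List (String × String)) × List (List (String × String))) each =>
      if pvDot each then (acc.1 ++ [each], acc.2) else (acc.1, acc.2 ++ [each]))
    ([], [])
  buckets.2 ++ buckets.1

-- ===== PORT B =====
def sortedDir_alt (dir_info : List (List (String × String))) : List (List (String × String)) :=
  PySem.List.sorted2 dir_info (fun path => pvDot path) (fun path => pvText path) false

-- ===== PRECONDITION & SPEC =====
-- Pre_ excludes exactly the inputs where the Python raises (both A and B do): an entry without
-- a 'text' key (KeyError) or with empty text (IndexError inside the subscript / sort key).
def Pre_sortedDir (dir_info : List (List (String × String))) : Prop :=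
  (dir_info.all (fun p => (((PySem.Dict.mk p).get? "text").map (fun t => !t.toList.isEmpty)).getD false)) = true
instance (dir_info : List (List (String × String))) : Decidable (Pre_sortedDir dir_info) := by unfold Pre_sortedDir; infer_instance

def pvWitness_sortedDir : (List (List (String × String))) :=
  [[("text", "b.txt")], [("text", ".a"), ("size", "3")], [("text", "A")]]

def Spec_sortedDir (dir_info : List (List (String × String))) (out : List (List (String × String))) : Prop := out = sortedDir_alt dir_info
instance (dir_info : List (List (String × String))) (out : List (List (String × String))) : Decidable (Spec_sortedDir dir_info out) := by unfold Spec_sortedDir; infer_instance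

-- ===== CLAIM (what is proved, stated in full; the proofs are below) =====
def Claim_equal_sortedDir : Prop := ∀ (dir_info : List (List (String × String))), Dom_sortedDir dir_info → Pre_sortedDir dir_info → Spec_sortedDir dir_info (sortedDir dir_info)

-- ===== LEMMAS AND PROOFS =====

-- insertBy places x in front when x goes before the head (or the list is empty)
theorem insertBy_all_before {α : Type} (before : α → α → Bool) (x : α) (l : List α)
    (h : ∀ c ∈ l, before x c = true) : PySem.List.insertBy before x l = x :: l := by
  cases l with
  | nil => rfl
  | cons y ys => simp [PySem.List.insertBy, h y (by simp)]

theorem insertBy_congr {α : Type} (before before' : α → α → Bool) (x : α) (l : List α)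
    (h : ∀ c ∈ l, before x c = before' x c) :
    PySem.List.insertBy before x l = PySem.List.insertBy before' x l := by
  induction l with
  | nil => rfl
  | cons y ys ih =>
    simp only [PySem.List.insertBy, h y (by simp)]
    rw [ih (fun c hc => h c (by simp [hc]))]

theorem insertBy_append_all_before {α : Type} (before : α → α → Bool) (x : α) (l1 l2 : List α)
    (h : ∀ c ∈ l2, before x c = true) :
    PySem.List.insertBy before x (l1 ++ l2) = PySem.List.insertBy before x l1 ++ l2 := by
  induction l1 with
  | nil => simp [PySem.List.insertBy]; exact insertBy_all_before before x l2 h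
  | cons y ys ih =>
    by_cases hy : before x y = true
    · simp [PySem.List.insertBy, hy]
    · simp only [List.cons_append, PySem.List.insertBy, hy, Bool.false_eq_true, if_false]
      rw [ih]

theorem insertBy_append_none_before {α : Type} (before : α → α → Bool) (x : α) (l1 l2 : List α)
    (h : ∀ c ∈ l1, before x c = false) :
    PySem.List.insertBy before x (l1 ++ l2) = l1 ++ PySem.List.insertBy before x l2 := by
  induction l1 with
  | nil => simp
  | cons y ys ih =>
    simp only [List.cons_append, PySem.List.insertBy, h y (by simp), Bool.false_eq_true, if_false]
    rw [ih (fun c hc => h c (by simp [hc]))]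

theorem filter_insertBy_neg {α : Type} (before : α → α → Bool) (p : α → Bool) (x : α) (l : List α)
    (hx : p x = false) : (PySem.List.insertBy before x l).filter p = l.filter p := by
  induction l with
  | nil => simp [PySem.List.insertBy, hx]
  | cons y ys ih =>
    by_cases hy : before x y = true
    · simp [PySem.List.insertBy, hy, hx]
    · simp only [PySem.List.insertBy, hy, Bool.false_eq_true, if_false]
      by_cases hpy : p y = true <;> simp [hpy, ih]

-- filter commutes with stable insertion into a key-sorted list, for p x = true
theorem filter_insertBy_pos {α κ : Type} [LinearOrder κ] (t : α → κ) (p : α → Bool) (x : α)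
    (l : List α) (hx : p x = true) (hpw : l.Pairwise (fun a c => t a ≤ t c)) :
    (PySem.List.insertBy (fun a c => decide (t a < t c)) x l).filter p
      = PySem.List.insertBy (fun a c => decide (t a < t c)) x (l.filter p) := by
  induction l with
  | nil => simp [PySem.List.insertBy, hx]
  | cons y ys ih =>
    rw [List.pairwise_cons] at hpw
    by_cases hlt : t x < t y
    · simp only [PySem.List.insertBy, decide_eq_true_eq, hlt, if_true]
      by_cases hpy : p y = true
      · simp [hpy, hx, PySem.List.insertBy, hlt]
      · simp only [List.filter_cons, hpy, Bool.false_eq_true, if_false, hx, if_true]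
        rw [insertBy_all_before]
        intro c hc
        have hcm : c ∈ ys := List.mem_of_mem_filter hc
        simp only [decide_eq_true_eq]
        exact lt_of_lt_of_le hlt (hpw.1 c hcm)
    · simp only [PySem.List.insertBy, decide_eq_true_eq, hlt, if_false]
      by_cases hpy : p y = true
      · simp only [List.filter_cons, hpy, if_true]
        rw [ih hpw.2]
        simp [PySem.List.insertBy, hlt]
      · simp [hpy, ih hpw.2]

-- the core fact: one stable sort on the composite key (Bool flag, t-key) equals
-- "stable sort on the t-key, then stable partition by the flag"
theorem sorted2_bool_split {α : Type} (b : α → Bool) (t : α → String) (xs : List α) :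
    PySem.List.sorted2 xs b t false
      = (PySem.List.sorted xs t false).filter (fun x => !b x)
        ++ (PySem.List.sorted xs t false).filter b := by
  induction xs using List.reverseRecOn with
  | nil => rfl
  | append_singleton xs x ih =>
    have hpw : (PySem.List.sorted xs t false).Pairwise (fun a c => t a ≤ t c) :=
      PySem.List.sorted_pairwise xs t
    have hs2 : PySem.List.sorted2 (xs ++ [x]) b t false
        = PySem.List.insertBy
            (fun a c => decide (b a < b c) || (!decide (b c < b a) && decide (t a < t c)))
            x (PySem.List.sorted2 xs b t false) := by
      simp [PySem.List.sorted2, List.foldl_append]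
    have hs1 : PySem.List.sorted (xs ++ [x]) t false
        = PySem.List.insertBy (fun a c => decide (t a < t c)) x (PySem.List.sorted xs t false) := by
      simp [PySem.List.sorted, List.foldl_append]
    set ys := PySem.List.sorted xs t false with hys
    rw [hs2, hs1, ih]
    by_cases hbx : b x = true
    · -- x is dotted: it never goes before a non-dotted entry, and within the dotted
      -- bucket the composite comparison is the t-comparison
      rw [insertBy_append_none_before]
      · rw [insertBy_congr _ (fun a c => decide (t a < t c)) x (ys.filter b)]
        · rw [filter_insertBy_neg _ _ _ _ (by simp [hbx]),
              filter_insertBy_pos t b x ys hbx hpw]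
        · intro c hc
          have := List.of_mem_filter hc
          simp [hbx, this]
      · intro c hc
        have := List.of_mem_filter hc
        simp only [Bool.not_eq_eq_eq_not, Bool.not_true] at this
        simp [hbx, this]
    · -- x is not dotted: it goes before every dotted entry, and within the non-dotted
      -- bucket the composite comparison is the t-comparison
      have hbx' : b x = false := by simpa using hbx
      rw [insertBy_append_all_before]
      · rw [insertBy_congr _ (fun a c => decide (t a < t c)) x (ys.filter (fun x => !b x))]
        · rw [filter_insertBy_pos t (fun x => !b x) x ys (by simp [hbx']) hpw,
              filter_insertBy_neg _ _ _ _ hbx']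
        · intro c hc
          have := List.of_mem_filter hc
          simp only [Bool.not_eq_eq_eq_not, Bool.not_true] at this
          simp [hbx', this]
      · intro c hc
        have := List.of_mem_filter hc
        simp [hbx', this]

-- ===== VERDICT (by name: the statement is the Claim_ definition above) =====
theorem sortedDir_spec : Claim_equal_sortedDir := by
  intro dir_info _ _
  show sortedDir dir_info = sortedDir_alt dir_info
  have hA : sortedDir dir_info =
      (List.foldl
        (fun (acc : List (List (String × String)) × List (List (String × String))) each =>
          if pvDot each then (acc.1 ++ [each], acc.2) else (acc.1, acc.2 ++ [each]))
        ([], []) (PySem.List.sorted dir_info (fun path => pvText path) false)).2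
      ++ (List.foldl
        (fun (acc : List (List (String × String)) × List (List (String × String))) each =>
          if pvDot each then (acc.1 ++ [each], acc.2) else (acc.1, acc.2 ++ [each]))
        ([], []) (PySem.List.sorted dir_info (fun path => pvText path) false)).1 := rfl
  rw [hA]
  unfold sortedDir_alt
  rw [sorted2_bool_split]
  rw [PySem.List.foldl_congr_mem (PySem.List.sorted dir_info (fun path => pvText path) false)
      (fun (acc : List (List (String × String)) × List (List (String × String))) each =>
          if pvDot each then (acc.1 ++ [each], acc.2) else (acc.1, acc.2 ++ [each]))
      (fun (acc : List (List (String × String)) × List (List (String × String))) each =>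
        (if pvDot each then acc.1 ++ [each] else acc.1,
         if pvDot each then acc.2 else acc.2 ++ [each]))
      ([], [])
      (by intro acc x _; by_cases h : pvDot x = true <;> simp [h])]
  rw [PySem.List.foldl_prod_mk
      (f := fun acc each => if pvDot each then acc ++ [each] else acc)
      (g := fun acc each => if pvDot each then acc else acc ++ [each])]
  rw [PySem.List.foldl_congr_mem (PySem.List.sorted dir_info (fun path => pvText path) false)
      (fun acc each => if pvDot each then acc else acc ++ [each])
      (fun acc each => if !pvDot each then acc ++ [each] else acc)
      []
      (by intro acc x _; by_cases h : pvDot x = true <;> simp [h])]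
  rw [PySem.List.foldl_append_if_eq_filter pvDot (PySem.List.sorted dir_info (fun path => pvText path) false) [],
      PySem.List.foldl_append_if_eq_filter (fun each => !pvDot each) (PySem.List.sorted dir_info (fun path => pvText path) false) []]
  simp
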